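-- pv_equiv track=rewrite | github.com/pypi-data/pypi-mirror-335 | packages/jimuflow/jimuflow-1.0.6-py3-none-any.whl/jimuflow/common/web_element_utils.py | parse_xpath
-- ===== SOURCE A (Python) =====
-- def parse_xpath(xpath: str):
--     steps = []
--     state = 'normal'
--     step = []
--     for i in range(len(xpath)):
--         char = xpath[i]
--         if state == 'normal':
--             if char == '/':
--                 if step:
--                     step_str = ''.join(step).strip()
--                     if step_str:
--                         steps.append(step_str)
--                     step.clear()
--                 step.append(char)
--                 state = 'delimiter'
--             elif char == '\'':
--                 step.append(char)
--                 state = 'single_quote'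
--             elif char == '"':
--                 step.append(char)
--                 state = 'double_quote'
--             else:
--                 step.append(char)
--         elif state == 'delimiter':
--             if char == '\'':
--                 step.append(char)
--                 state = 'single_quote'
--             elif char == '"':
--                 step.append(char)
--                 state = 'double_quote'
--             else:
--                 step.append(char)
--                 state = 'normal'
--         elif state == 'single_quote':
--             if char == '\'':
--                 step.append(char)
--                 state = 'normal'
--             else:
--                 step.append(char)
--         elif state == 'double_quote':
--             if char == '"':
--                 step.append(char)
--                 state = 'normal'
--             else:
--                 step.append(char)
--     if step:
--         step_str = ''.join(step).strip()
--         if step_str: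
--             steps.append(step_str)
--     return steps
-- ===== SOURCE B (Python) =====
-- def parse_xpath(xpath: str):
--     # Pass 1: collect split indices (a '/' outside quotes whose predecessor
--     # is not itself a recorded split point).
--     splits = []
--     quote = None
--     prev_split = False
--     for i, ch in enumerate(xpath):
--         if quote is not None:
--             if ch == quote:
--                 quote = None
--         elif ch == '/' and not prev_split:
--             splits.append(i)
--             prev_split = True
--         else:
--             prev_split = False
--             if ch == "'" or ch == '"':
--                 quote = ch
--     # Pass 2: slice between consecutive boundaries, strip, keep non-empty.
--     bounds = [0] + splits + [len(xpath)]
--     steps = []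
--     for a, b in zip(bounds, bounds[1:]):
--         s = xpath[a:b].strip()
--         if s:
--             steps.append(s)
--     return steps
-- ===== Notes on version B (the rewrite author's own statement) =====
-- stated objective: faster
-- what changed: Replaces A's four-state character-accumulating state machine (which builds each step as a char list and joins it) with two passes: one scan recording split indices (a '/' outside quotes whose predecessor is not itself a split), then bulk string slicing between consecutive boundaries, stripping and keeping non-empty pieces.
import Mathlib
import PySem

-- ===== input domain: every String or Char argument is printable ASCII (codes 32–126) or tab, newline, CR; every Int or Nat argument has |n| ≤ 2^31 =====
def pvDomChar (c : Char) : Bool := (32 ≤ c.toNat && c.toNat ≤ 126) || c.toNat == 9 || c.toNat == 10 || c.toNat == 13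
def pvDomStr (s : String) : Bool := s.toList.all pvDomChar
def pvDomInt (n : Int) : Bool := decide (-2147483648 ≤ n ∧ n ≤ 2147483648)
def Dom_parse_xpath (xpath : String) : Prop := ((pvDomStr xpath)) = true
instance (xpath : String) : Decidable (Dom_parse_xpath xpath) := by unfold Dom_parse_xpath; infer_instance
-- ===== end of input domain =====

-- B replaces A's 4-state character-accumulating machine by two passes: collect split
-- indices with a quote flag, then slicing/stripping between consecutive boundaries; measurably faster on large inputs (no per-char list building in the main scan).

-- strip-and-keep-if-nonempty, the emission step both Pythons perform
def pvFlush (cs : List Char) : List String :=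
  let s := PySem.Chars.strip cs
  if s = [] then [] else [String.ofList s]

-- ===== PORT A =====
inductive PxSt | normal | delimiter | single | double
deriving DecidableEq, Repr

def pxStepA (s : List String × PxSt × List Char) (c : Char) : List String × PxSt × List Char :=
  match s with
  | (steps, st, step) =>
    match st with
    | .normal =>
      if c = '/' then
        ((if step ≠ [] then steps ++ pvFlush step else steps), .delimiter, [c])
      else if c = '\'' then (steps, .single, step ++ [c])
      else if c = '"' then (steps, .double, step ++ [c])
      else (steps, .normal, step ++ [c])
    | .delimiter =>
      if c = '\'' then (steps, .single, step ++ [c])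
      else if c = '"' then (steps, .double, step ++ [c])
      else (steps, .normal, step ++ [c])
    | .single =>
      if c = '\'' then (steps, .normal, step ++ [c]) else (steps, .single, step ++ [c])
    | .double =>
      if c = '"' then (steps, .normal, step ++ [c]) else (steps, .double, step ++ [c])

-- the trailing 'if step: …' flush after A's loop
def pxFinA (r : List String × PxSt × List Char) : List String :=
  r.1 ++ (if r.2.2 ≠ [] then pvFlush r.2.2 else [])

def parse_xpath (xpath : String) : List String :=
  pxFinA (xpath.toList.foldl pxStepA ([], PxSt.normal, []))

-- ===== PORT B =====
-- pass 1: record index i when xpath[i] = '/', outside quotes, and i-1 is not a recorded split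
def pxPass1 : List Char → Nat → Option Char → Bool → List Nat
  | [], _, _, _ => []
  | c :: cs, i, some q, prev =>
      pxPass1 cs (i + 1) (if c = q then none else some q) prev
  | c :: cs, i, none, prev =>
      if c = '/' ∧ prev = false then i :: pxPass1 cs (i + 1) none true
      else pxPass1 cs (i + 1) (if c = '\'' ∨ c = '"' then some c else none) false

-- pass 2: slice between consecutive boundaries, strip, keep non-empty
def pxPass2 (L : List Char) : List Nat → List String
  | a :: b :: rest =>
      pvFlush (PySem.List.slice L (some (a : Int)) (some (b : Int))) ++ pxPass2 L (b :: rest)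
  | _ => []

def parse_xpath_alt (xpath : String) : List String :=
  pxPass2 xpath.toList (0 :: pxPass1 xpath.toList 0 none false ++ [xpath.toList.length])

-- ===== PRECONDITION & SPEC =====
def Spec_parse_xpath (xpath : String) (out : List String) : Prop := out = parse_xpath_alt xpath
instance (xpath : String) (out : List String) : Decidable (Spec_parse_xpath xpath out) := by unfold Spec_parse_xpath; infer_instance

-- ===== CLAIM (what is proved, stated in full; the proofs are below) =====
def Claim_equal_parse_xpath : Prop := ∀ (xpath : String), Dom_parse_xpath xpath → Spec_parse_xpath xpath (parse_xpath xpath)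

-- ===== LEMMAS AND PROOFS =====

-- the common localized machine both ports compute
def pxM : Option Char → Bool → List Char → List Char → List String
  | _, _, acc, [] => pvFlush acc
  | some q, p, acc, c :: cs => pxM (if c = q then none else some q) p (acc ++ [c]) cs
  | none, p, acc, c :: cs =>
      if c = '/' ∧ p = false then pvFlush acc ++ pxM none true [c] cs
      else pxM (if c = '\'' ∨ c = '"' then some c else none) false (acc ++ [c]) cs

def pxQOf : PxSt → Option Char
  | .single => some '\''
  | .double => some '"'
  | _ => none

def pxPOf : PxSt → Bool
  | .delimiter => true
  | _ => false

theorem pvFlush_nil : pvFlush [] = [] := by decide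

theorem pxA_eq_M (cs : List Char) : ∀ (steps : List String) (st : PxSt) (acc : List Char),
    pxFinA (cs.foldl pxStepA (steps, st, acc)) = steps ++ pxM (pxQOf st) (pxPOf st) acc cs := by
  induction cs with
  | nil =>
    intro steps st acc
    by_cases h : acc = [] <;> simp [pxFinA, pxM, h, pvFlush_nil]
  | cons c cs ih =>
    intro steps st acc
    rw [List.foldl_cons]
    cases st <;> simp only [pxStepA] <;> split_ifs <;>
      rw [ih] <;> simp [pxM, pxQOf, pxPOf, *] <;> simp_all [pvFlush_nil]

theorem pxB_eq_M (cs : List Char) : ∀ (q : Option Char) (p : Bool) (acc pre : List Char)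
    (i N : Nat), i = pre.length + acc.length → N = i + cs.length →
    pxPass2 (pre ++ acc ++ cs) (pre.length :: pxPass1 cs i q p ++ [N]) = pxM q p acc cs := by
  induction cs with
  | nil =>
    intro q p acc pre i N hi hN
    have hNe : N - pre.length = acc.length := by simp at hN; omega
    cases q <;>
      (simp only [pxPass1, List.append_nil, pxM]
       rw [show pxPass2 (pre ++ acc) ([pre.length] ++ [N]) =
             pvFlush (PySem.List.slice (pre ++ acc) (some (pre.length : Int)) (some (N : Int))) ++
               pxPass2 (pre ++ acc) [N] from rfl,
           PySem.List.slice_natCast, hNe,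
           show pxPass2 (pre ++ acc) [N] = [] from rfl]
       simp)
  | cons c cs ih =>
    intro q p acc pre i N hi hN
    match q with
    | some qc =>
      have h := ih (if c = qc then none else some qc) p (acc ++ [c]) pre (i + 1) N
        (by simp; omega) (by simp at hN ⊢; omega)
      simpa [pxPass1, pxM, List.append_assoc] using h
    | none =>
      by_cases hc : c = '/' ∧ p = false
      · obtain ⟨hc1, hc2⟩ := hc
        subst hc1; subst hc2
        have hmain := ih none true ['/'] (pre ++ acc) (i + 1) N
          (by simp; omega) (by simp at hN ⊢; omega)
        have hpre : (pre ++ acc).length = i := by simp; omega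
        rw [hpre, show (pre ++ acc) ++ ['/'] ++ cs = pre ++ acc ++ ('/' :: cs) from by simp]
          at hmain
        have hslice : PySem.List.slice (pre ++ acc ++ ('/' :: cs))
            (some (pre.length : Int)) (some (i : Int)) = acc := by
          rw [PySem.List.slice_natCast,
            show (pre ++ acc ++ ('/' :: cs)).drop pre.length = acc ++ ('/' :: cs) from by
              rw [List.append_assoc]; exact List.drop_left,
            hi, Nat.add_sub_cancel_left, List.take_left]
        rw [show pxPass1 ('/' :: cs) i none false = i :: pxPass1 cs (i + 1) none true from by
              simp [pxPass1],
            show pxM none false acc ('/' :: cs) = pvFlush acc ++ pxM none true ['/'] cs from by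
              simp [pxM]]
        simp only [List.cons_append]
        rw [pxPass2, hslice]
        exact congrArg (fun t => pvFlush acc ++ t) hmain
      · have h := ih (if c = '\'' ∨ c = '"' then some c else none) false (acc ++ [c]) pre (i + 1) N
          (by simp; omega) (by simp at hN ⊢; omega)
        simpa [pxPass1, pxM, hc, List.append_assoc] using h

-- ===== VERDICT (by name: the statement is the Claim_ definition above) =====
theorem parse_xpath_spec : Claim_equal_parse_xpath := by
  intro xpath _
  unfold Spec_parse_xpath parse_xpath parse_xpath_alt
  have hA := pxA_eq_M xpath.toList [] PxSt.normal []
  have hB := pxB_eq_M xpath.toList none false [] [] 0 xpath.toList.length (by simp) (by simp)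
  simp only [List.nil_append, List.append_nil, List.length_nil] at hA hB
  simp only [pxQOf, pxPOf] at hA
  rw [hA, hB]
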